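-- pv_equiv track=rewrite | github.com/Iker-Jimenez/2020_Advent_of_Code | day05/puzzle2.py | rec_calc_col
-- ===== SOURCE A (Python) =====
-- def rec_calc_col(colcode, cols):
--     len_cols = len(cols)
--     if len_cols > 2:
--         if colcode[0] == "L":
--             return rec_calc_col(colcode[1:], cols[0:int(len_cols/2)])
--         else:
--             return rec_calc_col(colcode[1:], cols[int(len_cols/2):])
--     else:
--         if colcode == "L":
--             return cols[0]
--         else:
--             return cols[1]
-- ===== SOURCE B (Python) =====
-- def rec_calc_col(colcode, cols):
--     # Iterative binary partition over an index window [lo, lo+n) -- no list slicing/copies.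
--     lo, n, i = 0, len(cols), 0
--     while n > 2:
--         half = n // 2
--         if colcode[i] == "L":
--             n = half
--         else:
--             lo += half
--             n -= half
--         i += 1
--     return cols[lo] if colcode[i:] == "L" else cols[lo + 1]
-- ===== Notes on version B (the rewrite author's own statement) =====
-- stated objective: faster
-- what changed: Replaces A's recursion that slices (copies) half of cols and colcode at every level by a single iterative loop over an index window [lo, lo+n) into the untouched input list, indexing once at the end.
import Mathlib
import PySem

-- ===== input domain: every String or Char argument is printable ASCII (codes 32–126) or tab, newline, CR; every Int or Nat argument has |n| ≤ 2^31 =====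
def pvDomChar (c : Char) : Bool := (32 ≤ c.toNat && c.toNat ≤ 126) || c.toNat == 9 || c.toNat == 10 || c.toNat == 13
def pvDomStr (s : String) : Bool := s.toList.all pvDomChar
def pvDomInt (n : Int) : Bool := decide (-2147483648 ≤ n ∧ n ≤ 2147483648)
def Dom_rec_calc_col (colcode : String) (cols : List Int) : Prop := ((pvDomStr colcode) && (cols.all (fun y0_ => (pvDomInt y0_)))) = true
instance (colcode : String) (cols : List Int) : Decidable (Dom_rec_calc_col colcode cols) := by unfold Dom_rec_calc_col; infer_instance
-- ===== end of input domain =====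

-- B replaces A's recursive slicing (which copies half the list at every level) by an
-- iterative index window [lo, lo+n) on the untouched input list; same return value on Pre_.

-- lemma cited by the ports' termination proofs (int(len/2) on a Nat length is len/2)
theorem pv_truncdiv_two (n : Nat) : PySem.Int.truncdiv (n : Int) 2 = ((n / 2 : Nat) : Int) := by
  simp [PySem.Int.truncdiv]

-- ===== PORT A =====
-- literal transliteration of Source A on (colcode.toList, cols); int(len_cols/2) is PySem.Int.truncdiv
def recCalcColGo (cs : List Char) (cols : List Int) : Int :=
  let len_cols := cols.length
  if len_cols > 2 then
    if PySem.List.pyGet? cs 0 = some 'L' then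
      recCalcColGo (PySem.List.slice cs (some 1) none)
        (PySem.List.slice cols (some 0) (some (PySem.Int.truncdiv (len_cols : Int) 2)))
    else
      recCalcColGo (PySem.List.slice cs (some 1) none)
        (PySem.List.slice cols (some (PySem.Int.truncdiv (len_cols : Int) 2)) none)
  else
    if cs = ['L'] then (PySem.List.pyGet? cols 0).getD 0   -- pyGet? none = IndexError, excluded by Pre_
    else (PySem.List.pyGet? cols 1).getD 0
termination_by cols.length
decreasing_by
  · rw [pv_truncdiv_two, PySem.List.slice_zero_start, PySem.List.slice_to_natCast]
    simp only [List.length_take]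
    omega
  · rw [pv_truncdiv_two]
    rw [PySem.List.slice_from_natCast]
    simp [List.length_drop]
    omega

def rec_calc_col (colcode : String) (cols : List Int) : Int :=
  recCalcColGo colcode.toList cols

-- ===== PORT B =====
-- the while-loop of Source B: state (lo, n, i), no slicing of cols
def altLoop (cs : List Char) (lo n i : Nat) : Nat × Nat × Nat :=
  if n > 2 then
    let half := n / 2
    if PySem.List.pyGet? cs (i : Int) = some 'L' then
      altLoop cs lo half (i + 1)
    else
      altLoop cs (lo + half) (n - half) (i + 1)
  else (lo, n, i)
termination_by n
decreasing_by all_goals omega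

def rec_calc_col_alt (colcode : String) (cols : List Int) : Int :=
  let cs := colcode.toList
  let s := altLoop cs 0 cols.length 0
  if PySem.List.slice cs (some (s.2.2 : Int)) none = ['L'] then
    (PySem.List.pyGet? cols (s.1 : Int)).getD 0
  else
    (PySem.List.pyGet? cols ((s.1 : Int) + 1)).getD 0

-- ===== PRECONDITION & SPEC =====
-- Pre_ holds EXACTLY on the inputs where the Python A returns (everywhere else A raises
-- IndexError): a shape condition on the code string and the list LENGTH only — it tracks the
-- window length through the L/R halvings and demands every index A takes be in range; it
-- computes no output value.
def preOk (cs : List Char) (n : Nat) : Bool :=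
  if n > 2 then
    match cs with
    | [] => false                     -- colcode[0] would raise
    | c :: rest => preOk rest (if c = 'L' then n / 2 else n - n / 2)
  else
    if cs = ['L'] then decide (1 ≤ n) else decide (2 ≤ n)   -- cols[0] / cols[1] in range

def Pre_rec_calc_col (colcode : String) (cols : List Int) : Prop :=
  preOk colcode.toList cols.length = true
instance (colcode : String) (cols : List Int) : Decidable (Pre_rec_calc_col colcode cols) := by
  unfold Pre_rec_calc_col; infer_instance

def pvWitness_rec_calc_col : String × List Int := ("RLL", [1, 2, 3, 4, 5, 6, 7, 8])

def Spec_rec_calc_col (colcode : String) (cols : List Int) (out : Int) : Prop := out = rec_calc_col_alt colcode cols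
instance (colcode : String) (cols : List Int) (out : Int) : Decidable (Spec_rec_calc_col colcode cols out) := by unfold Spec_rec_calc_col; infer_instance

-- ===== CLAIM (what is proved, stated in full; the proofs are below) =====
def Claim_equal_rec_calc_col : Prop := ∀ (colcode : String) (cols : List Int), Dom_rec_calc_col colcode cols → Pre_rec_calc_col colcode cols → Spec_rec_calc_col colcode cols (rec_calc_col colcode cols)

-- ===== LEMMAS AND PROOFS =====

-- Loop/recursion correspondence: A run on the window (full.drop lo).take n with the code
-- suffix cs.drop i equals B's loop continued from state (lo, n, i), provided the window fits
-- inside full and Pre_'s length condition holds for the suffix state.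
theorem pv_main (n : Nat) : ∀ (cs : List Char) (full : List Int) (lo i : Nat),
    lo + n ≤ full.length → preOk (cs.drop i) n = true →
    recCalcColGo (cs.drop i) ((full.drop lo).take n) =
      (let s := altLoop cs lo n i
       if PySem.List.slice cs (some (s.2.2 : Int)) none = ['L'] then
         (PySem.List.pyGet? full (s.1 : Int)).getD 0
       else
         (PySem.List.pyGet? full ((s.1 : Int) + 1)).getD 0) := by
  induction n using Nat.strong_induction_on with
  | _ n ih =>
  intro cs full lo i hle hpre
  have hlen : ((full.drop lo).take n).length = n := by
    simp only [List.length_take, List.length_drop]; omega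
  by_cases hn : n > 2
  · -- loop/recursion step
    rw [preOk.eq_def] at hpre
    rw [if_pos hn] at hpre
    cases hd : cs.drop i with
    | nil => rw [hd] at hpre; exact absurd hpre (by simp)
    | cons c rest =>
      rw [hd] at hpre
      have hcsi : cs[i]? = some c := by
        have h0 : (cs.drop i)[0]? = some c := by rw [hd]; rfl
        simpa using h0
      have hrest : cs.drop (i + 1) = rest := by
        have := congrArg List.tail hd
        simpa [List.tail_drop] using this
      rw [recCalcColGo]
      simp only [hlen, if_pos hn, PySem.List.pyGet?_zero_cons, pv_truncdiv_two,
        PySem.List.slice_zero_start, PySem.List.slice_to_natCast, PySem.List.slice_from_one,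
        List.tail_cons]
      by_cases hc : c = 'L'
      · have haltB : altLoop cs lo n i = altLoop cs lo (n / 2) (i + 1) := by
          rw [altLoop]
          simp [hn, hcsi, hc]
        have htake : ((full.drop lo).take n).take (n / 2) = (full.drop lo).take (n / 2) := by
          rw [List.take_take]; congr 1; omega
        rw [if_pos (by simp [hc]), htake, haltB]
        have := ih (n / 2) (by omega) cs full lo (i + 1) (by omega)
          (by rw [hrest]; simpa [hc] using hpre)
        rw [hrest] at this
        exact this
      · have haltB : altLoop cs lo n i = altLoop cs (lo + n / 2) (n - n / 2) (i + 1) := by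
          rw [altLoop]
          simp [hn, hcsi, hc]
        have hdrop : PySem.List.slice ((full.drop lo).take n) (some ((n / 2 : Nat) : Int)) none
            = (full.drop (lo + n / 2)).take (n - n / 2) := by
          rw [PySem.List.slice_from_natCast, List.drop_take, List.drop_drop]
        rw [if_neg (by simp [hc]), hdrop, haltB]
        have := ih (n - n / 2) (by omega) cs full (lo + n / 2) (i + 1) (by omega)
          (by rw [hrest]; simpa [hc] using hpre)
        rw [hrest] at this
        exact this
  · -- loop exit / base case
    have haltB : altLoop cs lo n i = (lo, n, i) := by rw [altLoop]; simp [hn]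
    rw [recCalcColGo]
    simp only [hlen, if_neg hn, haltB, PySem.List.slice_from_natCast]
    rw [preOk.eq_def, if_neg hn] at hpre
    by_cases hL : cs.drop i = ['L']
    · rw [if_pos hL, if_pos hL]
      rw [hL] at hpre
      have h1n : 1 ≤ n := by simpa using hpre
      rw [PySem.List.pyGet?_zero, PySem.List.pyGet?_natCast,
        List.getElem?_take_of_lt (by omega), List.getElem?_drop]
      norm_num
    · rw [if_neg hL, if_neg hL]
      rw [if_neg hL] at hpre
      have h2n : 2 ≤ n := by simpa using hpre
      have e1 : ((lo : Int) + 1) = ((lo + 1 : Nat) : Int) := by push_cast; ring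
      rw [e1, PySem.List.pyGet?_natCast]
      have e2 : PySem.List.pyGet? ((full.drop lo).take n) 1 = ((full.drop lo).take n)[1]? := by
        simp [PySem.List.pyGet?_of_nonneg]
      rw [e2, List.getElem?_take_of_lt (by omega), List.getElem?_drop]

-- ===== VERDICT (by name: the statement is the Claim_ definition above) =====
theorem rec_calc_col_spec : Claim_equal_rec_calc_col := by
  intro colcode cols _hdom hpre
  unfold Spec_rec_calc_col rec_calc_col rec_calc_col_alt
  have h := pv_main cols.length colcode.toList cols 0 0 (by simp) (by simpa [Pre_rec_calc_col] using hpre)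
  simpa using h
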